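-- pv_equiv track=rewrite | github.com/happyhillll/MOGAKKO_pythonbasic | 10일차.py | moonjae
-- ===== SOURCE A (Python) =====
-- def moonjae(a):
--     sum=0
--     while True:
--         if a==0:
--             return(sum)
--             break
--         else:
--             sum=sum+a #정수 n부터 0까지의 숫자를 더함
--             a-= 1 #정수 n을 -1씩 해서 0으로 만듬
-- ===== SOURCE B (Python) =====
-- def moonjae(a):
--     # closed form for 0+1+...+a (Gauss)
--     return a * (a + 1) // 2
-- ===== Notes on version B (the rewrite author's own statement) =====
-- stated objective: faster
-- what changed: Replaces the decrement-to-zero accumulation loop with the closed-form Gauss sum a*(a+1)//2.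
import Mathlib
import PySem

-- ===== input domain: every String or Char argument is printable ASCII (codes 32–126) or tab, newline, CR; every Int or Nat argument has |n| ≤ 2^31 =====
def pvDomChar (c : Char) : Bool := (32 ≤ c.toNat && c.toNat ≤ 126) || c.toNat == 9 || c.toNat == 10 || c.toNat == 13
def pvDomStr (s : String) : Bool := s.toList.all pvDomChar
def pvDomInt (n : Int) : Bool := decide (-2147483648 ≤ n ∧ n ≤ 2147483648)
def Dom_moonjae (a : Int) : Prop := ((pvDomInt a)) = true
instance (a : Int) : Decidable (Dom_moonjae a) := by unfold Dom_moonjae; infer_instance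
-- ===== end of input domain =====

-- B replaces A's O(a) decrement loop by the closed form a*(a+1)//2 (asymptotically faster).

-- ===== PORT A =====
-- A's while-loop: sum += a; a -= 1 until a == 0. For 0 ≤ a it runs exactly a.toNat
-- iterations; the Nat argument is the current value of a (fuel = value, exact on Pre_).
def moonjaeLoop : Nat → Int → Int
  | 0, sum => sum
  | Nat.succ n, sum => moonjaeLoop n (sum + (Nat.succ n : Int))

def moonjae (a : Int) : Int := moonjaeLoop a.toNat 0

-- ===== PORT B =====
def moonjae_alt (a : Int) : Int := PySem.Int.floordiv (a * (a + 1)) 2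

-- ===== PRECONDITION & SPEC =====
-- A's while loop never terminates for a < 0 (a only decreases), so Pre_ excludes negatives.
def Pre_moonjae (a : Int) : Prop := 0 ≤ a
instance (a : Int) : Decidable (Pre_moonjae a) := by unfold Pre_moonjae; infer_instance
def pvWitness_moonjae : Int := 5

def Spec_moonjae (a : Int) (out : Int) : Prop := out = moonjae_alt a
instance (a : Int) (out : Int) : Decidable (Spec_moonjae a out) := by unfold Spec_moonjae; infer_instance

-- ===== CLAIM (what is proved, stated in full; the proofs are below) =====
def Claim_equal_moonjae : Prop := ∀ (a : Int), Dom_moonjae a → Pre_moonjae a → Spec_moonjae a (moonjae a)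

-- ===== LEMMAS AND PROOFS =====
lemma moonjaeLoop_eq (n : Nat) : ∀ s : Int, moonjaeLoop n s = s + (n * (n + 1)) / 2 := by
  induction n with
  | zero => intro s; simp [moonjaeLoop]
  | succ k ih =>
      intro s
      rw [moonjaeLoop, ih]
      have h2 : ((k : Int) + 1) * ((k : Int) + 2) / 2 = (k : Int) * ((k : Int) + 1) / 2 + ((k : Int) + 1) := by
        have : ((k : Int) + 1) * ((k : Int) + 2) = (k : Int) * ((k : Int) + 1) + ((k : Int) + 1) * 2 := by ring
        rw [this, Int.add_mul_ediv_right _ _ (by norm_num : (2:Int) ≠ 0)]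
      push_cast
      ring_nf
      ring_nf at h2
      omega

-- ===== VERDICT (by name: the statement is the Claim_ definition above) =====
theorem moonjae_spec : Claim_equal_moonjae := by
  intro a _ hpre
  unfold Spec_moonjae moonjae moonjae_alt
  rw [moonjaeLoop_eq]
  rw [PySem.Int.floordiv_eq_ediv_of_pos (by omega)]
  have : ((a.toNat : Int)) = a := Int.toNat_of_nonneg hpre
  rw [this]
  ring_nf
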